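-- pv_equiv track=rewrite | github.com/buddygr/qpython-sl4a | gui/WinGui/BaseWindow.py | Str2Xml
-- ===== SOURCE A (Python) =====
-- def Str2Xml(s):
--     t=[];r=t.append
--     for i in s:
--         j=ord(i)
--         if j<256 and not (i.isalpha() or i.isdigit()):
--             r('&#');r(str(j));r(";")
--         else:
--             r(i)
--     return ''.join(t)
-- ===== SOURCE B (Python) =====
-- _TABLE = {j: '&#' + str(j) + ';' for j in range(256)
--           if not (chr(j).isalpha() or chr(j).isdigit())}
--
-- def Str2Xml(s):
--     return s.translate(_TABLE)
-- ===== Notes on version B (the rewrite author's own statement) =====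
-- stated objective: idiomatic
-- what changed: Replaces A's per-character if/else loop that appends entity pieces to a list with a translation table precomputed once over range(256) and a single s.translate(table) call.
import Mathlib
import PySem

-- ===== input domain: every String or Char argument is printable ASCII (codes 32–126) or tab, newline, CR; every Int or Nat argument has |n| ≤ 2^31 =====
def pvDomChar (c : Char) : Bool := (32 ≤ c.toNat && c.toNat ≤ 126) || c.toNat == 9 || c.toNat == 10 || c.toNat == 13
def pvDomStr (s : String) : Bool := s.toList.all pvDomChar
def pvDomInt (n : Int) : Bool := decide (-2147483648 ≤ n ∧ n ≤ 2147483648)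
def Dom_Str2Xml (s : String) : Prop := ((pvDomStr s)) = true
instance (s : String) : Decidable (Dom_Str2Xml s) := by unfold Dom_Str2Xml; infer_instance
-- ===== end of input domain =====

-- B replaces A's per-character if/else loop by a translation table built once over range(256)
-- and a single s.translate(table) call (ported as a per-char table lookup); objective: idiomatic.

-- ===== PORT A =====
def Str2Xml (s : String) : String :=
  let t := s.toList.foldl (fun t i =>
    let j : Int := (i.toNat : Int)
    if j < 256 && !(PySem.Chars.isalpha i || PySem.Chars.isdigit i) then
      t ++ ["&#", PySem.Int.toStr j, ";"]
    else
      t ++ [String.ofList [i]]) ([] : List String)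
  PySem.Str.join "" t

-- ===== PORT B =====
-- the dict comprehension {j: '&#'+str(j)+';' for j in range(256) if not (chr(j).isalpha() or chr(j).isdigit())}
def pvXmlTable : PySem.Dict Int String :=
  (PySem.List.pyRange 0 256 1).foldl (fun d j =>
    if !(PySem.Chars.isalpha (Char.ofNat j.toNat) || PySem.Chars.isdigit (Char.ofNat j.toNat)) then
      d.insert j ("&#" ++ PySem.Int.toStr j ++ ";")
    else d) PySem.Dict.empty

-- s.translate(table): each char is replaced by table[ord(c)] if present, else kept
def Str2Xml_alt (s : String) : String :=
  PySem.Str.join "" (s.toList.map (fun c => pvXmlTable.getD (c.toNat : Int) (String.ofList [c])))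

-- ===== PRECONDITION & SPEC =====
def Spec_Str2Xml (s : String) (out : String) : Prop := out = Str2Xml_alt s
instance (s : String) (out : String) : Decidable (Spec_Str2Xml s out) := by unfold Spec_Str2Xml; infer_instance

-- ===== CLAIM (what is proved, stated in full; the proofs are below) =====
def Claim_equal_Str2Xml : Prop := ∀ (s : String), Dom_Str2Xml s → Spec_Str2Xml s (Str2Xml s)

-- ===== LEMMAS AND PROOFS =====

-- per-character pieces of A's loop
def pvGA (i : Char) : List String :=
  if ((i.toNat : Int) < 256 && !(PySem.Chars.isalpha i || PySem.Chars.isdigit i)) then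
    ["&#", PySem.Int.toStr (i.toNat : Int), ";"]
  else
    [String.ofList [i]]

def pvGB (c : Char) : String := pvXmlTable.getD (c.toNat : Int) (String.ofList [c])

lemma pvFoldA (l : List Char) (t : List String) :
    l.foldl (fun t i =>
      let j : Int := (i.toNat : Int)
      if j < 256 && !(PySem.Chars.isalpha i || PySem.Chars.isdigit i) then
        t ++ ["&#", PySem.Int.toStr j, ";"]
      else
        t ++ [String.ofList [i]]) t = t ++ l.flatMap pvGA := by
  induction l generalizing t with
  | nil => simp
  | cons c l ih =>
    rw [List.foldl_cons, ih, List.flatMap_cons]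
    simp only [pvGA]
    split_ifs with h <;> simp

-- with empty separator, join is flatten
lemma pvJoinNilFlatten (xss : List (List Char)) :
    PySem.Chars.join [] xss = xss.flatten := by
  induction xss with
  | nil => simp [PySem.Chars.join_nil]
  | cons a rest ih =>
    cases rest with
    | nil => simp [PySem.Chars.join_singleton]
    | cons b r => simp [PySem.Chars.join_cons_cons] at ih ⊢; simpa using ih

lemma pvJoinEmpty (parts : List String) :
    PySem.Str.join "" parts = String.ofList ((parts.map String.toList).flatten) := by
  simp [PySem.Str.join, pvJoinNilFlatten]

-- the per-character agreement, checked over the whole domain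
set_option maxRecDepth 20000 in
lemma pvPerChar : (List.range 127).all (fun n =>
    !((32 ≤ n && n ≤ 126) || n == 9 || n == 10 || n == 13) ||
    (PySem.Str.join "" (pvGA (Char.ofNat n)) == pvGB (Char.ofNat n))) = true := by
  decide

lemma pvPerChar' (c : Char) (hc : pvDomChar c = true) :
    PySem.Str.join "" (pvGA c) = pvGB c := by
  have hlt : c.toNat < 127 := by
    simp only [pvDomChar, Bool.or_eq_true, Bool.and_eq_true, decide_eq_true_eq,
      beq_iff_eq] at hc
    omega
  have h := List.all_eq_true.mp pvPerChar c.toNat (List.mem_range.mpr hlt)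
  rw [Char.ofNat_toNat] at h
  have h2 : (!(pvDomChar c) || (PySem.Str.join "" (pvGA c) == pvGB c)) = true := h
  rw [hc] at h2
  simpa using h2

lemma pvPieces (c : Char) (hc : pvDomChar c = true) :
    ((pvGA c).map String.toList).flatten = (pvGB c).toList := by
  have := congrArg String.toList (pvPerChar' c hc)
  rwa [pvJoinEmpty, String.toList_ofList] at this

lemma pvMain (l : List Char) (h : l.all pvDomChar = true) :
    ((l.flatMap pvGA).map String.toList).flatten
      = ((l.map pvGB).map String.toList).flatten := by
  induction l with
  | nil => simp
  | cons c l ih =>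
    simp only [List.all_cons, Bool.and_eq_true] at h
    simp only [List.flatMap_cons, List.map_cons, List.map_append, List.flatten_append,
      List.flatten_cons]
    rw [ih h.2, pvPieces c h.1]

-- ===== VERDICT (by name: the statement is the Claim_ definition above) =====
theorem Str2Xml_spec : Claim_equal_Str2Xml := by
  intro s hs
  unfold Spec_Str2Xml Str2Xml Str2Xml_alt
  rw [pvFoldA, List.nil_append, pvJoinEmpty, pvJoinEmpty]
  exact congrArg String.ofList (pvMain s.toList hs)
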